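-- pv_equiv track=rewrite | github.com/brian7m3/DRX | drx_main.py | parse_suffixes
-- ===== SOURCE A (Python) =====
-- def parse_suffixes(cmd):
--     valid_suffixes = {'I', 'R', 'P', 'M', 'W'}  # Only upper-case W allowed
--     idx = len(cmd)
--     suffixes = ""
--     # Walk backwards until no more valid suffixes
--     while idx > 0 and cmd[idx-1] in valid_suffixes:
--         suffixes = cmd[idx-1] + suffixes
--         idx -= 1
--     return cmd[:idx], suffixes if suffixes else None
-- ===== SOURCE B (Python) =====
-- def parse_suffixes(cmd):
--     # Forward scan: track the start index of the current run of valid chars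
--     # that extends to the position scanned so far; reset on any other char.
--     start = None
--     for i, ch in enumerate(cmd):
--         if ch in 'IRPMW':
--             if start is None:
--                 start = i
--         else:
--             start = None
--     if start is None:
--         return cmd, None
--     return cmd[:start], cmd[start:]
-- ===== Notes on version B (the rewrite author's own statement) =====
-- stated objective: alternative
-- what changed: Replaces A's right-to-left strip loop that builds the suffix by prepending characters with a single left-to-right pass that tracks (and resets) the start index of the current valid run, splitting the string once at the end.
import Mathlib
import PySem

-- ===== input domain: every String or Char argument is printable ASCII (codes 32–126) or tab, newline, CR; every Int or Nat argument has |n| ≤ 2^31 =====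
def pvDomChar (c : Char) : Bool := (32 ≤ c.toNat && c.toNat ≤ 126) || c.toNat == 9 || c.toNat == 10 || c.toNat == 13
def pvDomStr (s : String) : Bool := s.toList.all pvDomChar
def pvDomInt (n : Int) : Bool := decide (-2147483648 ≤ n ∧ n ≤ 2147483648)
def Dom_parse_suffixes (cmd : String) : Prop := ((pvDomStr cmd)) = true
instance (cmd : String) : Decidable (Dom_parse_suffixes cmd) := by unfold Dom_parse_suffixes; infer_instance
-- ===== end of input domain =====

-- B replaces A's right-to-left strip loop with a single left-to-right pass that
-- tracks (and resets) the start index of the current valid run (alternative).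

-- ===== PORT A =====
-- valid_suffixes = {'I', 'R', 'P', 'M', 'W'} : membership test in the set
def pvValidA (c : Char) : Bool := (['I', 'R', 'P', 'M', 'W'] : List Char).contains c

-- the while loop: idx counts down, prepending each valid char to suffixes
def pvLoopA (cs : List Char) : Nat → List Char → Nat × List Char
  | 0, suf => (0, suf)
  | i + 1, suf =>
    match cs[i]? with
    | some c => if pvValidA c then pvLoopA cs i (c :: suf) else (i + 1, suf)
    | none => (i + 1, suf)

def parse_suffixes (cmd : String) : String × Option String :=
  let cs := cmd.toList
  let r := pvLoopA cs cs.length []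
  (String.ofList (PySem.List.slice cs none (some (r.1 : Int))),
   if r.2 = [] then none else some (String.ofList r.2))

-- ===== PORT B =====
-- for i, ch in enumerate(cmd): update the candidate run-start index
def pvStepB (st : Option Int) (p : Int × Char) : Option Int :=
  if ("IRPMW".toList).contains p.2 then
    match st with
    | none => some p.1
    | some k => some k
  else none

def parse_suffixes_alt (cmd : String) : String × Option String :=
  let cs := cmd.toList
  match (PySem.List.enumerate cs 0).foldl pvStepB none with
  | none => (cmd, none)
  | some k => (String.ofList (PySem.List.slice cs none (some k)),
               some (String.ofList (PySem.List.slice cs (some k) none)))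

-- ===== PRECONDITION & SPEC =====
def Spec_parse_suffixes (cmd : String) (out : String × Option String) : Prop := out = parse_suffixes_alt cmd
instance (cmd : String) (out : String × Option String) : Decidable (Spec_parse_suffixes cmd out) := by unfold Spec_parse_suffixes; infer_instance

-- ===== CLAIM =====
def Claim_equal_parse_suffixes : Prop := ∀ (cmd : String), Dom_parse_suffixes cmd → Spec_parse_suffixes cmd (parse_suffixes cmd)

-- ===== LEMMAS AND PROOFS =====

-- A's loop splits cs.take i into its rstrip-prefix and valid tail.
theorem pvLoopA_eq (cs : List Char) :
    ∀ (i : Nat) (acc : List Char), i ≤ cs.length →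
      pvLoopA cs i acc =
        (((cs.take i).rdropWhile pvValidA).length, (cs.take i).rtakeWhile pvValidA ++ acc) := by
  intro i
  induction i with
  | zero => intro acc _; simp [pvLoopA, List.rdropWhile, List.rtakeWhile]
  | succ i ih =>
    intro acc hi
    have hlt : i < cs.length := Nat.lt_of_succ_le hi
    have htake : cs.take (i + 1) = cs.take i ++ [cs[i]] := by
      rw [List.take_succ, List.getElem?_eq_getElem hlt]; rfl
    rw [pvLoopA, List.getElem?_eq_getElem hlt]
    dsimp only
    by_cases hv : pvValidA cs[i]
    · rw [if_pos hv, ih _ (Nat.le_of_lt hlt), htake,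
        List.rdropWhile_concat_pos _ _ _ hv, List.rtakeWhile_concat_pos _ _ _ hv]
      simp
    · rw [if_neg hv, htake, List.rdropWhile_concat_neg _ _ _ hv,
        List.rtakeWhile_concat_neg _ _ _ hv]
      simp
      exact hlt

theorem pvValid_pred_eq : (fun c => ("IRPMW".toList).contains c) = pvValidA := by
  funext c; rfl

theorem rdropWhile_of_rtakeWhile_nil {cs : List Char} (h : cs.rtakeWhile pvValidA = []) :
    cs.rdropWhile pvValidA = cs := by
  have h2 : List.rdropWhile pvValidA cs ++ List.rtakeWhile pvValidA cs = cs :=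
    List.rdropWhile_append_rtakeWhile
  rwa [h, List.append_nil] at h2

-- B's forward fold computes the start index of the maximal valid tail (or none).
theorem pvFoldB_eq (cs : List Char) :
    (PySem.List.enumerate cs 0).foldl pvStepB none =
      if cs.rtakeWhile pvValidA = [] then none
      else some ((cs.rdropWhile pvValidA).length : Int) := by
  induction cs using List.reverseRecOn with
  | nil => simp [PySem.List.enumerate, List.rtakeWhile]
  | append_singleton cs c ih =>
    rw [PySem.List.enumerate_append, List.foldl_append, ih]
    have hcons : PySem.List.enumerate [c] ((0 : Int) + cs.length) = [((cs.length : Int), c)] := by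
      simp [PySem.List.enumerate_cons, PySem.List.enumerate_nil]
    rw [hcons]
    simp only [List.foldl_cons, List.foldl_nil]
    by_cases hv : pvValidA c
    · have hv' : ("IRPMW".toList).contains c = true := (congrFun pvValid_pred_eq c).trans hv
      rw [List.rtakeWhile_concat_pos _ _ _ hv, List.rdropWhile_concat_pos _ _ _ hv]
      by_cases h0 : cs.rtakeWhile pvValidA = []
      · rw [if_pos h0]
        simp only [pvStepB, hv', if_pos]
        simp [rdropWhile_of_rtakeWhile_nil h0, h0]
      · rw [if_neg h0]
        simp only [pvStepB, hv', if_pos]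
        simp [h0]
    · have hvf : pvValidA c = false := by simpa using hv
      have hv' : ("IRPMW".toList).contains c = false := (congrFun pvValid_pred_eq c).trans hvf
      rw [List.rtakeWhile_concat_neg _ _ _ hv]
      simp only [pvStepB, hv']
      simp

-- ===== VERDICT =====
theorem parse_suffixes_spec : Claim_equal_parse_suffixes := by
  intro cmd _
  show parse_suffixes cmd = parse_suffixes_alt cmd
  simp only [parse_suffixes, parse_suffixes_alt]
  rw [pvFoldB_eq]
  rw [pvLoopA_eq cmd.toList cmd.toList.length [] (Nat.le_refl _)]
  simp only [List.take_length, List.append_nil]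
  have hpre : cmd.toList.rdropWhile pvValidA <+: cmd.toList := List.rdropWhile_prefix _ _
  have h1 : PySem.List.slice cmd.toList none (some ((cmd.toList.rdropWhile pvValidA).length : Int))
      = cmd.toList.rdropWhile pvValidA := by
    rw [PySem.List.slice_to_natCast]
    exact ((List.prefix_iff_eq_take).mp hpre).symm
  have h2 : PySem.List.slice cmd.toList (some ((cmd.toList.rdropWhile pvValidA).length : Int)) none
      = cmd.toList.rtakeWhile pvValidA := by
    rw [PySem.List.slice_from_natCast]
    have h := List.drop_left (l₁ := cmd.toList.rdropWhile pvValidA) (l₂ := cmd.toList.rtakeWhile pvValidA)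
    rwa [List.rdropWhile_append_rtakeWhile] at h
  by_cases h0 : cmd.toList.rtakeWhile pvValidA = []
  · rw [if_pos h0]
    rw [rdropWhile_of_rtakeWhile_nil h0] at h1
    simp only [rdropWhile_of_rtakeWhile_nil h0, h0, if_pos]
    rw [PySem.List.slice_to_natCast]
    rw [List.take_length, String.ofList_toList]
  · rw [if_neg h0]
    simp [h1, h2, h0]
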